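-- pv_equiv track=rewrite | github.com/aiyanalam31/personal-resume-builder | resume_generator.py | _calc_max_entries
-- ===== SOURCE A (Python) =====
-- PAGE_LINE_BUDGET      = 47   # calibrated from actual renderer measurements
--
-- OVERHEAD_PER_EXP      = 3
--
-- OVERHEAD_PER_PROJ     = 2
--
-- FIXED_OVERHEAD        = 4
--
-- def _calc_max_entries(profile: dict) -> tuple[int, int]:
--     """
--     Calculate the maximum number of experiences and projects that fit
--     on one page with a MINIMUM of 2 bullets each.
--     This ensures depth over breadth — fewer, richer entries beat
--     many entries with a single bullet each.
--     """
--     edu_lines   = len(profile.get("education", [])) * 2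
--     cert_lines  = 0  # unknown at selection time — assume none
--     skill_lines = 2
--     fixed = FIXED_OVERHEAD + edu_lines + cert_lines + skill_lines
--
--     available = PAGE_LINE_BUDGET - fixed
--
--     # Each entry needs overhead + minimum 2 bullets
--     min_lines_per_exp  = OVERHEAD_PER_EXP  + 2
--     min_lines_per_proj = OVERHEAD_PER_PROJ + 2
--
--     # Find the max combination that fits, biasing 65% to exp
--     best_exp, best_proj = 3, 2
--     for n_exp in range(5, 0, -1):
--         for n_proj in range(4, 0, -1):
--             needed = (n_exp * min_lines_per_exp) + (n_proj * min_lines_per_proj)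
--             if needed <= available:
--                 best_exp  = n_exp
--                 best_proj = n_proj
--                 return best_exp, best_proj
--
--     return best_exp, best_proj
-- ===== SOURCE B (Python) =====
-- PAGE_LINE_BUDGET      = 47
-- OVERHEAD_PER_EXP      = 3
-- OVERHEAD_PER_PROJ     = 2
-- FIXED_OVERHEAD        = 4
--
-- def _calc_max_entries(profile: dict) -> tuple[int, int]:
--     """Closed-form version: available lines after fixed overhead determine
--     the counts directly, no nested search."""
--     available = PAGE_LINE_BUDGET - (FIXED_OVERHEAD + 2 * len(profile.get("education", [])) + 2)
--     if available < 9:          # not even 1 exp + 1 proj fit: keep the default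
--         return 3, 2
--     n_exp = min(5, (available - 4) // 5)
--     n_proj = min(4, (available - 5 * n_exp) // 4)
--     return n_exp, n_proj
-- ===== Notes on version B (the rewrite author's own statement) =====
-- stated objective: simpler
-- what changed: Replaces A's fixed 5x4 nested descending search loop with closed-form arithmetic: compute the available line budget, fall back to the default pair when even one of each entry kind cannot fit, otherwise take the experience count and then the project count by capped floor division.
import Mathlib
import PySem

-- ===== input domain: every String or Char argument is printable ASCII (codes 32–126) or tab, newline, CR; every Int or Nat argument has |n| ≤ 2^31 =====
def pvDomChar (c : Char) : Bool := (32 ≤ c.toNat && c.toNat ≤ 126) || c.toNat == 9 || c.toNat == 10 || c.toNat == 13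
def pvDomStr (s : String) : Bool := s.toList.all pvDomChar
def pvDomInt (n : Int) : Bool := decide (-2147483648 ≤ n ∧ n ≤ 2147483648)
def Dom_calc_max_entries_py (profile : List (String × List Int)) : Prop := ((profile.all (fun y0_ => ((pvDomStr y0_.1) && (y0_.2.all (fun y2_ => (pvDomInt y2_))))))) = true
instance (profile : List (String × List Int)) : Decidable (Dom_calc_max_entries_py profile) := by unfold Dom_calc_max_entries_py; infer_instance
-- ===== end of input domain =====

-- B replaces A's fixed 5×4 nested search loop with closed-form floor-division arithmetic (simpler).

-- ===== PORT A =====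
-- inner 'for n_proj in range(4, 0, -1)': first fitting pair or none
def pvInnerA (available me mp n_exp : Int) : List Int → Option (Int × Int)
  | [] => none
  | p :: rest =>
      if n_exp * me + p * mp ≤ available then some (n_exp, p)
      else pvInnerA available me mp n_exp rest

-- outer 'for n_exp in range(5, 0, -1)'
def pvOuterA (available me mp : Int) : List Int → Option (Int × Int)
  | [] => none
  | n :: rest =>
      match pvInnerA available me mp n (PySem.List.pyRange 4 0 (-1)) with
      | some r => some r
      | none => pvOuterA available me mp rest

def calc_max_entries_py (profile : List (String × List Int)) : Int × Int :=
  let edu_lines : Int := ((profile.lookup "education").getD []).length * 2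
  let cert_lines : Int := 0
  let skill_lines : Int := 2
  let fixed := 4 + edu_lines + cert_lines + skill_lines
  let available := 47 - fixed
  let min_lines_per_exp := 3 + 2
  let min_lines_per_proj := 2 + 2
  match pvOuterA available min_lines_per_exp min_lines_per_proj (PySem.List.pyRange 5 0 (-1)) with
  | some r => r
  | none => (3, 2)

-- ===== PORT B =====
def calc_max_entries_py_alt (profile : List (String × List Int)) : Int × Int :=
  let available : Int := 47 - (4 + 2 * (((profile.lookup "education").getD []).length : Int) + 2)
  if available < 9 then (3, 2)
  else
    let n_exp := min 5 (PySem.Int.floordiv (available - 4) 5)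
    let n_proj := min 4 (PySem.Int.floordiv (available - 5 * n_exp) 4)
    (n_exp, n_proj)

-- ===== PRECONDITION & SPEC =====
def Spec_calc_max_entries_py (profile : List (String × List Int)) (out : Int × Int) : Prop := out = calc_max_entries_py_alt profile
instance (profile : List (String × List Int)) (out : Int × Int) : Decidable (Spec_calc_max_entries_py profile out) := by unfold Spec_calc_max_entries_py; infer_instance

-- ===== CLAIM (what is proved, stated in full; the proofs are below) =====
def Claim_equal_calc_max_entries_py : Prop := ∀ (profile : List (String × List Int)), Dom_calc_max_entries_py profile → Spec_calc_max_entries_py profile (calc_max_entries_py profile)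

-- ===== LEMMAS AND PROOFS =====

-- both programs depend on the profile only through the length of its "education" list
lemma pvInnerA_none (available me mp n : Int) (ps : List Int)
    (h : ∀ p ∈ ps, available < n * me + p * mp) :
    pvInnerA available me mp n ps = none := by
  induction ps with
  | nil => rfl
  | cons p rest ih =>
      rw [pvInnerA, if_neg (by have := h p (List.mem_cons_self ..); omega)]
      exact ih fun q hq => h q (List.mem_cons_of_mem _ hq)

lemma pvOuterA_none_of_small (available : Int) (h : available < 9) :
    pvOuterA available 5 4 (PySem.List.pyRange 5 0 (-1)) = none := by
  have h5 : PySem.List.pyRange 5 0 (-1) = [5, 4, 3, 2, 1] := by decide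
  rw [h5]
  have inner : ∀ n : Int, 1 ≤ n →
      pvInnerA available 5 4 n (PySem.List.pyRange 4 0 (-1)) = none := by
    intro n hn
    have h4 : PySem.List.pyRange 4 0 (-1) = [4, 3, 2, 1] := by decide
    rw [h4]
    exact pvInnerA_none _ _ _ _ _ (by intro p hp; fin_cases hp <;> omega)
  simp [pvOuterA, inner 5 (by omega), inner 4 (by omega), inner 3 (by omega),
    inner 2 (by omega), inner 1 (by omega)]

lemma pv_core_eq (e : Nat) :
    (match pvOuterA (47 - (4 + (e : Int) * 2 + 0 + 2)) (3 + 2) (2 + 2)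
        (PySem.List.pyRange 5 0 (-1)) with
     | some r => r
     | none => ((3 : Int), (2 : Int))) =
    (if (47 - (4 + 2 * (e : Int) + 2) : Int) < 9 then ((3 : Int), (2 : Int))
     else
       let a : Int := 47 - (4 + 2 * (e : Int) + 2)
       let n_exp := min 5 (PySem.Int.floordiv (a - 4) 5)
       let n_proj := min 4 (PySem.Int.floordiv (a - 5 * n_exp) 4)
       (n_exp, n_proj)) := by
  by_cases h : e ≤ 16
  · interval_cases e <;> decide
  · have hsmall : (47 - (4 + (e : Int) * 2 + 0 + 2)) < 9 := by omega
    rw [show ((3:Int)+2)=5 from rfl, show ((2:Int)+2)=4 from rfl, pvOuterA_none_of_small _ hsmall, if_pos (by omega)]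

-- ===== VERDICT (by name: the statement is the Claim_ definition above) =====
theorem calc_max_entries_py_spec : Claim_equal_calc_max_entries_py := by
  intro profile _
  unfold Spec_calc_max_entries_py calc_max_entries_py calc_max_entries_py_alt
  exact pv_core_eq ((profile.lookup "education").getD []).length
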